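-- pv_equiv track=rewrite | github.com/chenpy2000/tale-suite | agents/llm_vqvae_agent.py | _align_to_admissible
-- ===== SOURCE A (Python) =====
-- def _align_to_admissible(action, admissible):
--     if not admissible:
--         return ""
--     action = (action or "").strip()
--     if len(action) < 2:
--         return ""
--     if action in admissible:
--         return action
--     low = action.lower()
--     for cmd in admissible:
--         if cmd.lower() == low:
--             return cmd
--     matches = []
--     for cmd in admissible:
--         cl = cmd.lower()
--         if cl in low or low in cl:
--             matches.append(cmd)
--     if matches:
--         return max(matches, key=len)
--     return ""
-- ===== SOURCE B (Python) =====
-- def _align_to_admissible(action, admissible):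
--     if not admissible:
--         return ""
--     action = (action or "").strip()
--     if len(action) < 2:
--         return ""
--     if action in admissible:
--         return action
--     low = action.lower()
--     by_lower = {}
--     for cmd in admissible:
--         by_lower.setdefault(cmd.lower(), cmd)
--     if low in by_lower:
--         return by_lower[low]
--     for cmd in sorted(admissible, key=len, reverse=True):
--         cl = cmd.lower()
--         if cl in low or low in cl:
--             return cmd
--     return ""
-- ===== Notes on version B (the rewrite author's own statement) =====
-- stated objective: alternative
-- what changed: The case-insensitive scan is replaced by a hash index (a lowercase->first-command dict built once, then one lookup), and the substring stage's collect-then-max(key=len) is replaced by a stable sort of admissible by length descending followed by returning the first substring match; the two original scanning loops disappear.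
import Mathlib
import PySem

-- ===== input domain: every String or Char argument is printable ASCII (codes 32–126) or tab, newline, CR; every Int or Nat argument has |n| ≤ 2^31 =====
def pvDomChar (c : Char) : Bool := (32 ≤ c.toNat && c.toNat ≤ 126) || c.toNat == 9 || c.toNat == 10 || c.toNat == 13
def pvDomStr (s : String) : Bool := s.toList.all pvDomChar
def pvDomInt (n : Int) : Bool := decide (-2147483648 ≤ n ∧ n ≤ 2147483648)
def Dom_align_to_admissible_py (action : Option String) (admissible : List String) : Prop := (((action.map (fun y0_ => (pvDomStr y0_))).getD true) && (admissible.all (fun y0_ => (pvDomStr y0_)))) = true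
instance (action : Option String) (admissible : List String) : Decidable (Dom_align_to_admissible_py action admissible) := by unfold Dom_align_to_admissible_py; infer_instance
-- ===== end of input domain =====

-- B replaces A's case-insensitive scan by a lowercase->command dict built once and looked up, and A's substring collect-then-max(key=len) by a stable length-descending sort followed by taking the first substring match; same results, similar cost.


-- ===== PORT A =====
def align_to_admissible_py (action : Option String) (admissible : List String) : String :=
  if admissible.isEmpty then ""
  else
    let act := PySem.Str.strip (action.getD "")
    if PySem.Str.len act < 2 then ""
    else if admissible.contains act then act
    else
      let low := PySem.Str.lower act
      -- for cmd in admissible: if cmd.lower() == low: return cmd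
      match admissible.find? (fun cmd => PySem.Str.lower cmd == low) with
      | some cmd => cmd
      | none =>
        -- matches = [cmd for cmd in admissible if cl in low or low in cl]
        let ms := admissible.filter (fun cmd =>
          PySem.Str.isIn (PySem.Str.lower cmd) low || PySem.Str.isIn low (PySem.Str.lower cmd))
        match PySem.List.max? ms (fun cmd => PySem.Str.len cmd) with
        | some m => m
        | none => ""

-- ===== PORT B =====
def align_to_admissible_py_alt (action : Option String) (admissible : List String) : String :=
  if admissible.isEmpty then ""
  else
    let act := PySem.Str.strip (action.getD "")
    if PySem.Str.len act < 2 then ""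
    else if admissible.contains act then act
    else
      let low := PySem.Str.lower act
      -- by_lower = {}; for cmd in admissible: by_lower.setdefault(cmd.lower(), cmd)
      let byLower : PySem.Dict String String :=
        admissible.foldl (fun d cmd => d.setdefault (PySem.Str.lower cmd) cmd) PySem.Dict.empty
      -- if low in by_lower: return by_lower[low]
      match byLower.get? low with
      | some c => c
      | none =>
        -- for cmd in sorted(admissible, key=len, reverse=True): if cl in low or low in cl: return cmd
        match (PySem.List.sorted admissible (fun cmd => PySem.Str.len cmd) true).find?
            (fun cmd => PySem.Str.isIn (PySem.Str.lower cmd) low || PySem.Str.isIn low (PySem.Str.lower cmd)) with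
        | some c => c
        | none => ""

-- ===== PRECONDITION & SPEC =====
def Spec_align_to_admissible_py (action : Option String) (admissible : List String) (out : String) : Prop := out = align_to_admissible_py_alt action admissible
instance (action : Option String) (admissible : List String) (out : String) : Decidable (Spec_align_to_admissible_py action admissible out) := by unfold Spec_align_to_admissible_py; infer_instance

-- ===== CLAIM (what is proved, stated in full; the proofs are below) =====
def Claim_equal_align_to_admissible_py : Prop := ∀ (action : Option String) (admissible : List String), Dom_align_to_admissible_py action admissible → Spec_align_to_admissible_py action admissible (align_to_admissible_py action admissible)

-- ===== LEMMAS AND PROOFS =====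

-- the dict built by setdefault keyed on lower() answers the same query as A's first-match scan
theorem pv_dict_get (low : String) : ∀ (l : List String) (d : PySem.Dict String String),
    (l.foldl (fun d cmd => d.setdefault (PySem.Str.lower cmd) cmd) d).get? low
      = (d.get? low).or (l.find? (fun cmd => PySem.Str.lower cmd == low)) := by
  intro l
  induction l with
  | nil => intro d; simp
  | cons x xs ih =>
    intro d
    simp only [List.foldl_cons, ih, List.find?_cons]
    by_cases h : PySem.Str.lower x == low
    · simp only [h]
      have hk : PySem.Str.lower x = low := by exact eq_of_beq h
      rw [hk, PySem.Dict.get?_setdefault_self]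
      cases d.get? low <;> rfl
    · simp only [h]
      rw [PySem.Dict.get?_setdefault_of_ne d x (fun he => h (by rw [he]; exact BEq.rfl))]

-- inserting x into a key-nonincreasing list: the first p-element of the result,
-- expressed by the max?-fold step
theorem pv_find_insertBy (p : String → Bool) (key : String → Int) (x : String) :
    ∀ (s : List String), s.Pairwise (fun a b => key b ≤ key a) →
    (PySem.List.insertBy (fun a b => decide (key b < key a)) x s).find? p =
      (if p x then
        (match s.find? p with
          | none => some x
          | some m => if key m < key x then some x else some m)
      else s.find? p) := by
  intro s
  induction s with
  | nil =>
    intro _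
    cases hp : p x <;> simp [PySem.List.insertBy, hp]
  | cons y ys ih =>
    intro hpw
    rw [List.pairwise_cons] at hpw
    obtain ⟨hy, hys⟩ := hpw
    simp only [PySem.List.insertBy]
    by_cases hc : key y < key x
    · rw [if_pos (decide_eq_true hc)]
      by_cases hp : p x
      · rw [List.find?_cons_of_pos hp, if_pos hp]
        cases hf : List.find? p (y :: ys) with
        | none => rfl
        | some m =>
          have hm : m ∈ y :: ys := List.mem_of_find?_eq_some hf
          have hle : key m ≤ key y := by
            rcases List.mem_cons.mp hm with h | h
            · rw [h]
            · exact hy m h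
          show some x = if key m < key x then some x else some m
          rw [if_pos (lt_of_le_of_lt hle hc)]
      · rw [List.find?_cons_of_neg (by simp [hp]), if_neg hp]
    · rw [if_neg (by simp [hc])]
      by_cases hpy : p y
      · rw [List.find?_cons_of_pos hpy]
        by_cases hp : p x
        · rw [if_pos hp, List.find?_cons_of_pos hpy]
          show some y = if key y < key x then some x else some y
          rw [if_neg hc]
        · rw [if_neg hp, List.find?_cons_of_pos hpy]
      · rw [List.find?_cons_of_neg (by simp [hpy]), List.find?_cons_of_neg (by simp [hpy]),
          ih hys]

-- Python's max(l + [x], key) in terms of max(l, key): one more fold step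
theorem pv_max_append_singleton (l : List String) (x : String) (key : String → Int) :
    PySem.List.max? (l ++ [x]) key =
      (match PySem.List.max? l key with
        | none => some x
        | some m => if key m < key x then some x else some m) := by
  unfold PySem.List.max?
  rw [List.foldl_append, List.foldl_cons, List.foldl_nil]
  split <;> rename_i heq <;> rw [heq]

-- the sorted-then-first-match scan computes A's max(matches, key=len)
theorem pv_find_sorted (p : String → Bool) (key : String → Int) :
    ∀ (xs : List String),
    (PySem.List.sorted xs key true).find? p = PySem.List.max? (xs.filter p) key := by
  intro xs
  induction xs using List.reverseRecOn with
  | nil => simp [PySem.List.sorted, PySem.List.max?]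
  | append_singleton xs x ih =>
    have hins : PySem.List.sorted (xs ++ [x]) key true
        = PySem.List.insertBy (fun a b => decide (key b < key a)) x (PySem.List.sorted xs key true) := by
      rw [PySem.List.sorted_rev_eq_foldl_insertBy, PySem.List.sorted_rev_eq_foldl_insertBy,
        List.foldl_append]
      rfl
    rw [hins, pv_find_insertBy p key x _ (PySem.List.sorted_pairwise_rev xs key), ih]
    by_cases hp : p x
    · rw [if_pos hp]
      have hfil : (xs ++ [x]).filter p = xs.filter p ++ [x] := by
        rw [List.filter_append]
        simp [hp]
      rw [hfil, pv_max_append_singleton]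
    · rw [if_neg hp]
      have hfil : (xs ++ [x]).filter p = xs.filter p := by
        rw [List.filter_append]
        simp [hp]
      rw [hfil]

-- ===== VERDICT (by name: the statement is the Claim_ definition above) =====
theorem align_to_admissible_py_spec : Claim_equal_align_to_admissible_py := by
  intro action admissible _
  unfold Spec_align_to_admissible_py align_to_admissible_py align_to_admissible_py_alt
  by_cases h1 : admissible.isEmpty
  · simp only [h1, if_true]
  · simp only [h1]
    by_cases h2 : PySem.Str.len (PySem.Str.strip (action.getD "")) < 2
    · simp only [h2, if_true]
    · simp only [h2]
      by_cases h3 : admissible.contains (PySem.Str.strip (action.getD ""))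
      · simp only [h3, if_true]
      · simp only [h3]
        rw [pv_dict_get, pv_find_sorted]
        simp only [PySem.Dict.get?_empty, Option.none_or]
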